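-- pv_equiv track=rewrite | github.com/Ray-1214/graduation_project | skill_graph/skill_abstractor.py | _is_subsumed
-- ===== SOURCE A (Python) =====
-- from typing import Any, Dict, List, Optional, Sequence, Tuple
--
-- def _is_subsumed(
--     ngram: Tuple[str, ...],
--     accepted: set[Tuple[str, ...]],
-- ) -> bool:
--     """Check if ngram is a contiguous sub-sequence of any accepted ngram."""
--     for existing in accepted:
--         if len(existing) <= len(ngram):
--             continue
--         # Check if ngram appears as contiguous slice of existing
--         elen = len(existing)
--         nlen = len(ngram)
--         for i in range(elen - nlen + 1):
--             if existing[i:i + nlen] == ngram: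
--                 return True
--     return False
-- ===== SOURCE B (Python) =====
-- def _is_subsumed(ngram, accepted):
--     """Check if ngram is a contiguous sub-sequence of any accepted ngram."""
--     n = len(ngram)
--
--     def occurs(seq):
--         # peel the head until ngram is a prefix or seq is too short
--         while len(seq) >= n:
--             if seq[:n] == ngram:
--                 return True
--             seq = seq[1:]
--         return False
--
--     return any(len(e) > n and occurs(e) for e in accepted)
-- ===== Notes on version B (the rewrite author's own statement) =====
-- stated objective: alternative
-- what changed: replaces the index loop over window start positions with a suffix-peeling scan (prefix test, then drop the head) wrapped in a guarded any() over the accepted tuples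
import Mathlib
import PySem

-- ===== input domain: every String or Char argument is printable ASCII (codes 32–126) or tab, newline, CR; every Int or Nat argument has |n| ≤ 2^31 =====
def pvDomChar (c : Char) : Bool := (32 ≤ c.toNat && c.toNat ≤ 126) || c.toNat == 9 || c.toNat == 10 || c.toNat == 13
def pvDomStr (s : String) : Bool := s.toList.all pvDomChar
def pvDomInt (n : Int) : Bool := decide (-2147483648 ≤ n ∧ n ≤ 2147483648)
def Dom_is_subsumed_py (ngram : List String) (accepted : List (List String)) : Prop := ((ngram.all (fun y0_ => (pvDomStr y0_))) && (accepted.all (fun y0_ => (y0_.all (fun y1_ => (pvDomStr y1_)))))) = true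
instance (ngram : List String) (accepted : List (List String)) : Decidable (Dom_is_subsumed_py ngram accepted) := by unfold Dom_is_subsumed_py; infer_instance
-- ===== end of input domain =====

-- B replaces A's index loop over window starts by a suffix-peeling prefix scan (alternative decomposition, same cost).
-- ===== PORT A =====
def is_subsumed_py (ngram : List String) (accepted : List (List String)) : Bool :=
  accepted.any (fun existing =>
    if existing.length ≤ ngram.length then false
    else
      let elen : Int := existing.length
      let nlen : Int := ngram.length
      (PySem.List.pyRange 0 (elen - nlen + 1) 1).any (fun i =>
        PySem.List.slice existing (some i) (some (i + nlen)) == ngram))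

-- ===== PORT B =====
-- 'occurs' loop of Source B: while len(seq) >= n: prefix test, else seq = seq[1:]
def occursIn (ngram : List String) (seq : List String) : Bool :=
  if seq.length < ngram.length then false
  else if seq.take ngram.length == ngram then true
  else
    match seq with
    | [] => false
    | _ :: rest => occursIn ngram rest
termination_by seq.length

def is_subsumed_py_alt (ngram : List String) (accepted : List (List String)) : Bool :=
  accepted.any (fun e => decide (ngram.length < e.length) && occursIn ngram e)

-- ===== PRECONDITION & SPEC =====
def Spec_is_subsumed_py (ngram : List String) (accepted : List (List String)) (out : Bool) : Prop := out = is_subsumed_py_alt ngram accepted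
instance (ngram : List String) (accepted : List (List String)) (out : Bool) : Decidable (Spec_is_subsumed_py ngram accepted out) := by unfold Spec_is_subsumed_py; infer_instance

-- ===== CLAIM (what is proved, stated in full; the proofs are below) =====
def Claim_equal_is_subsumed_py : Prop := ∀ (ngram : List String) (accepted : List (List String)), Dom_is_subsumed_py ngram accepted → Spec_is_subsumed_py ngram accepted (is_subsumed_py ngram accepted)

-- ===== LEMMAS AND PROOFS =====

-- the window scan over List.range equals the suffix-peeling scan
lemma range_any_eq_occursIn (ngram : List String) :
    ∀ (seq : List String), ngram.length ≤ seq.length →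
      (List.range (seq.length - ngram.length + 1)).any
          (fun k => (seq.drop k).take ngram.length == ngram) = occursIn ngram seq := by
  intro seq
  induction seq with
  | nil =>
    intro h
    have hn : ngram = [] := List.eq_nil_of_length_eq_zero (Nat.le_zero.mp h)
    subst hn
    simp [occursIn]
  | cons x t ih =>
    intro h
    rw [occursIn]
    have hnot : ¬ ((x :: t).length < ngram.length) := by omega
    rw [if_neg hnot]
    rw [List.range_succ_eq_map]
    simp only [List.any_cons, List.any_map]
    by_cases hp : (x :: t).take ngram.length == ngram
    · simp [hp]
    · rw [if_neg (by simpa using hp)]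
      simp only [List.drop_zero, hp, Bool.false_or]
      by_cases hle : ngram.length ≤ t.length
      · have hlen : (x :: t).length - ngram.length = t.length - ngram.length + 1 := by
          simp only [List.length_cons]; omega
        rw [hlen, ← ih hle]
        exact congrArg (List.any _) (funext fun k => by simp [List.drop_succ_cons])
      · have hlen : (x :: t).length - ngram.length = 0 := by
          simp only [List.length_cons]; omega
        rw [hlen, occursIn.eq_def, if_pos (by omega)]
        simp

-- per accepted element, A's body equals B's body
lemma elem_eq (ngram existing : List String) :
    (if existing.length ≤ ngram.length then false
     else
       let elen : Int := existing.length
       let nlen : Int := ngram.length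
       (PySem.List.pyRange 0 (elen - nlen + 1) 1).any (fun i =>
         PySem.List.slice existing (some i) (some (i + nlen)) == ngram))
    = (decide (ngram.length < existing.length) && occursIn ngram existing) := by
  by_cases h : existing.length ≤ ngram.length
  · simp [h, Nat.not_lt.mpr h]
  · rw [Nat.not_le] at h
    rw [if_neg (by omega)]
    simp only [decide_eq_true (h), Bool.true_and]
    have hb : ((existing.length : Int) - ngram.length + 1) = ((existing.length - ngram.length + 1 : Nat) : Int) := by
      push_cast [Nat.cast_sub (Nat.le_of_lt h)]; ring
    rw [hb, PySem.List.pyRange_zero_natCast, List.any_map]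
    have := range_any_eq_occursIn ngram existing (Nat.le_of_lt h)
    rw [← this]
    exact congrArg (List.any _) (funext fun k => by
      rw [Function.comp_apply, show ((k : Int) + (ngram.length : Int)) = ((k : Nat) : Int) + ((ngram.length : Nat) : Int) from rfl,
        PySem.List.slice_natCast_add])

-- ===== VERDICT (by name: the statement is the Claim_ definition above) =====
theorem is_subsumed_py_spec : Claim_equal_is_subsumed_py := by
  intro ngram accepted _
  unfold Spec_is_subsumed_py is_subsumed_py is_subsumed_py_alt
  exact congrArg (List.any accepted) (funext fun existing => elem_eq ngram existing)
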